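-- pv_equiv track=rewrite | github.com/NureKalenykVira/named-entity-recognition-research | src/data/preprocess_llm.py | find_sublist_span
-- ===== SOURCE A (Python) =====
-- def find_sublist_span(tokens: list[str], entity_tokens: list[str], used_spans: set[tuple[int, int]]) -> tuple[int, int] | None:
--     if not entity_tokens or len(entity_tokens) > len(tokens):
--         return None
--
--     for start in range(len(tokens) - len(entity_tokens) + 1):
--         end = start + len(entity_tokens)
--         if tuple(tokens[start:end]) == tuple(entity_tokens):
--             span = (start, end)
--             if span not in used_spans:
--                 return span
--
--     return None
-- ===== SOURCE B (Python) =====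
-- def _kmp_step(pattern, fail, k, c):
--     while k > 0 and pattern[k] != c:
--         k = fail[k - 1]
--     if pattern[k] == c:
--         k += 1
--     return k
--
-- def find_sublist_span(tokens: list[str], entity_tokens: list[str], used_spans: set[tuple[int, int]]) -> tuple[int, int] | None:
--     m, n = len(entity_tokens), len(tokens)
--     if m == 0 or m > n:
--         return None
--     fail = [0]
--     k = 0
--     for j in range(1, m):
--         k = _kmp_step(entity_tokens, fail, k, entity_tokens[j])
--         fail.append(k)
--     j = 0
--     for i, c in enumerate(tokens):
--         j = _kmp_step(entity_tokens, fail, j, c)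
--         if j == m:
--             span = (i + 1 - m, i + 1)
--             if span not in used_spans:
--                 return span
--             j = fail[m - 1]
--     return None
-- ===== Notes on version B (the rewrite author's own statement) =====
-- stated objective: alternative
-- what changed: Replaces A's shift-by-one rescan, which slices out and compares the whole m-token window at every start position, by Knuth-Morris-Pratt matching: a precomputed failure table over entity_tokens and a single left-to-right pass over tokens that never re-examines matched tokens, checking each occurrence it discovers against used_spans.
import Mathlib
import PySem

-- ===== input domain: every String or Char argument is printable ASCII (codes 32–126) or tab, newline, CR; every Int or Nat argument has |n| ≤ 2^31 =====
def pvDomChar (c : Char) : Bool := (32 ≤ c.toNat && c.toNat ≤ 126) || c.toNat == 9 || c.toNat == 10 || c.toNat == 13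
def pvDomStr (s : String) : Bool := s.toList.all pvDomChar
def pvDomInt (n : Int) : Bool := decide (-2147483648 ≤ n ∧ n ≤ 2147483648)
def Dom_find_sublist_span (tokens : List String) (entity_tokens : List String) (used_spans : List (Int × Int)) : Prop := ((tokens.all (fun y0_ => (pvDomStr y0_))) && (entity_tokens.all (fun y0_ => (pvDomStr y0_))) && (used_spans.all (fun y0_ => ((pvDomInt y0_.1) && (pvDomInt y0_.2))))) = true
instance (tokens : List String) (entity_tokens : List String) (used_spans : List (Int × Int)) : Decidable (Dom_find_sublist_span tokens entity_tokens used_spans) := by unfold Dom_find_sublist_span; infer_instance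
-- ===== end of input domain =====

-- B replaces A's slice-and-compare rescan at every start position by Knuth-Morris-Pratt
-- matching (failure table + one left-to-right pass), returning the first occurrence whose
-- span is not in used_spans; same return value, different algorithm.


-- ===== PORT A =====
-- the `for start in range(...)` loop with early return
def fssA_go (tokens : List String) (entity_tokens : List String) (used_spans : List (Int × Int)) : List Int → Option (Int × Int)
  | [] => none
  | start :: more =>
      let e : Int := start + entity_tokens.length
      if PySem.List.slice tokens (some start) (some e) = entity_tokens ∧ (start, e) ∉ used_spans
      then some (start, e)
      else fssA_go tokens entity_tokens used_spans more

def find_sublist_span (tokens : List String) (entity_tokens : List String) (used_spans : List (Int × Int)) : Option (Int × Int) :=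
  if entity_tokens = [] ∨ entity_tokens.length > tokens.length then none
  else fssA_go tokens entity_tokens used_spans
        (PySem.List.pyRange 0 ((tokens.length : Int) - entity_tokens.length + 1) 1)

-- ===== PORT B =====
-- the `while k > 0 and pattern[k] != c: k = fail[k-1]` loop of _kmp_step; fuel = k bounds the
-- iteration count (k strictly decreases each turn, since fail[k-1] <= k-1 for the tables B builds).
-- List indices in B's Python are Nat-valued and always in range, so `.getD _ ""`/`.getD _ 0` is exact.
def kmpStepGo (p : List String) (fail : List Nat) (c : String) : Nat → Nat → Nat
  | 0, k => k
  | fuel+1, k =>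
      if 0 < k ∧ ¬ p.getD k "" = c then kmpStepGo p fail c fuel (fail.getD (k-1) 0) else k

-- _kmp_step: descend through the failure chain, then extend by one on a match
def kmpStep (p : List String) (fail : List Nat) (k : Nat) (c : String) : Nat :=
  if p.getD (kmpStepGo p fail c k k) "" = c then kmpStepGo p fail c k k + 1 else 0

-- the `for j in range(1, m): k = _kmp_step(...); fail.append(k)` loop (cnt = iterations left,
-- fail.length plays the role of j)
def kmpBuild (p : List String) : Nat → List Nat → Nat → List Nat
  | 0, fail, _ => fail
  | cnt+1, fail, k =>
      kmpBuild p cnt (fail ++ [kmpStep p fail k (p.getD fail.length "")])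
        (kmpStep p fail k (p.getD fail.length ""))

-- the `for i, c in enumerate(tokens)` loop with early return
def kmpScan (p : List String) (fail : List Nat) (used : List (Int × Int)) : List String → Nat → Nat → Option (Int × Int)
  | [], _, _ => none
  | c :: ts, i, j =>
      if kmpStep p fail j c = p.length then
        if ((i : Int) + 1 - p.length, (i : Int) + 1) ∉ used then
          some ((i : Int) + 1 - p.length, (i : Int) + 1)
        else kmpScan p fail used ts (i+1) (fail.getD (p.length - 1) 0)
      else kmpScan p fail used ts (i+1) (kmpStep p fail j c)

def find_sublist_span_alt (tokens : List String) (entity_tokens : List String) (used_spans : List (Int × Int)) : Option (Int × Int) :=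
  if entity_tokens.length = 0 ∨ entity_tokens.length > tokens.length then none
  else kmpScan entity_tokens (kmpBuild entity_tokens (entity_tokens.length - 1) [0] 0) used_spans tokens 0 0

-- ===== PRECONDITION & SPEC =====
def Spec_find_sublist_span (tokens : List String) (entity_tokens : List String) (used_spans : List (Int × Int)) (out : Option (Int × Int)) : Prop := out = find_sublist_span_alt tokens entity_tokens used_spans
instance (tokens : List String) (entity_tokens : List String) (used_spans : List (Int × Int)) (out : Option (Int × Int)) : Decidable (Spec_find_sublist_span tokens entity_tokens used_spans out) := by unfold Spec_find_sublist_span; infer_instance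

-- ===== CLAIM (what is proved, stated in full; the proofs are below) =====
def Claim_equal_find_sublist_span : Prop := ∀ (tokens : List String) (entity_tokens : List String) (used_spans : List (Int × Int)), Dom_find_sublist_span tokens entity_tokens used_spans → Spec_find_sublist_span tokens entity_tokens used_spans (find_sublist_span tokens entity_tokens used_spans)

-- ===== LEMMAS AND PROOFS =====

-- `x is a suffix of w` facts -------------------------------------------------

lemma suffix_of_suffix_le {α : Type} (l1 l2 w : List α) (h1 : l1 <:+ w) (h2 : l2 <:+ w)
    (hl : l1.length ≤ l2.length) : l1 <:+ l2 := by
  obtain ⟨u1, hu1⟩ := h1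
  obtain ⟨u2, hu2⟩ := h2
  have h3 : w.drop u1.length = l1 := by rw [← hu1]; exact List.drop_left
  have h4 : w.drop u2.length = l2 := by rw [← hu2]; exact List.drop_left
  have hw1 : w.length = u1.length + l1.length := by rw [← hu1]; simp
  have hw2 : w.length = u2.length + l2.length := by rw [← hu2]; simp
  have key : l2.drop (l2.length - l1.length) = l1 := by
    calc l2.drop (l2.length - l1.length)
        = (w.drop u2.length).drop (l2.length - l1.length) := by rw [h4]
      _ = w.drop (u2.length + (l2.length - l1.length)) := by rw [List.drop_drop]
      _ = w.drop u1.length := by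
            rw [show u2.length + (l2.length - l1.length) = u1.length from by omega]
      _ = l1 := h3
  refine ⟨l2.take (l2.length - l1.length), ?_⟩
  have h5 := List.take_append_drop (l2.length - l1.length) l2
  rw [key] at h5
  exact h5

lemma take_succ_getD (p : List String) (q : Nat) (h : q < p.length) :
    p.take (q+1) = p.take q ++ [p.getD q ""] := by
  rw [List.take_add_one, List.getElem?_eq_getElem h, List.getD_eq_getElem p "" h]
  rfl

lemma suffix_append_singleton (a w : List String) (x c : String) :
    a ++ [x] <:+ w ++ [c] ↔ a <:+ w ∧ x = c := by
  rw [← List.reverse_prefix]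
  simp only [List.reverse_append, List.reverse_cons, List.reverse_nil, List.nil_append,
    List.cons_append]
  rw [List.cons_prefix_cons, List.reverse_prefix]
  exact and_comm

lemma ext_suffix_iff (p w : List String) (c : String) (q : Nat) (h : q < p.length) :
    (p.take (q+1) <:+ w ++ [c]) ↔ (p.take q <:+ w ∧ p.getD q "" = c) := by
  rw [take_succ_getD p q h, suffix_append_singleton]

lemma window_iff_suffix (t p : List String) (s : Nat) (hs : s + p.length ≤ t.length) :
    ((t.drop s).take p.length = p) ↔ p <:+ t.take (s + p.length) := by
  constructor
  · intro h
    have e : t.take (s + p.length) = t.take s ++ (t.drop s).take p.length := List.take_add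
    rw [h] at e
    exact ⟨t.take s, e.symm⟩
  · intro h
    have hX : (t.drop s).take p.length <:+ t.take (s + p.length) :=
      ⟨t.take s, (List.take_add).symm⟩
    have hlen : ((t.drop s).take p.length).length = p.length := by
      rw [List.length_take, List.length_drop]; omega
    have hps : p <:+ (t.drop s).take p.length :=
      suffix_of_suffix_le _ _ _ h hX (le_of_eq hlen.symm)
    obtain ⟨u, hu⟩ := hps
    have hlu : u.length = 0 := by
      have h5 := congrArg List.length hu
      rw [hlen] at h5
      simp only [List.length_append] at h5
      omega
    have hu0 : u = [] := by cases u with | nil => rfl | cons a l => simp at hlu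
    rw [hu0] at hu
    simpa using hu.symm

-- find? helpers --------------------------------------------------------------

lemma pv_find?_congr {α : Type} (l : List α) (f g : α → Bool) (h : ∀ x ∈ l, f x = g x) :
    l.find? f = l.find? g := by
  induction l with
  | nil => rfl
  | cons a l ih =>
      have ha := h a (by simp)
      by_cases hfa : f a = true
      · rw [List.find?_cons_of_pos hfa, List.find?_cons_of_pos (by rw [← ha]; exact hfa)]
      · rw [List.find?_cons_of_neg hfa, List.find?_cons_of_neg (by rw [← ha]; exact hfa)]
        exact ih (fun x hx => h x (by simp [hx]))

lemma pv_find?_range'_some (f : Nat → Bool) (s₀ : Nat) :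
    ∀ (cnt a : Nat), a ≤ s₀ → s₀ < a + cnt → f s₀ = true →
      (∀ s, a ≤ s → s < s₀ → f s = false) → (List.range' a cnt).find? f = some s₀ := by
  intro cnt
  induction cnt with
  | zero => intro a h1 h2 _ _; exact absurd h2 (by omega)
  | succ cnt ih =>
      intro a h1 h2 h3 h4
      rw [List.range'_succ]
      by_cases ha : a = s₀
      · subst ha
        rw [List.find?_cons_of_pos h3]
      · rw [List.find?_cons_of_neg (by rw [h4 a le_rfl (by omega)]; simp)]
        exact ih (a+1) (by omega) (by omega) h3 (fun s hs1 hs2 => h4 s (by omega) hs2)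

lemma pv_getD_append_left {α : Type} (l l' : List α) (i : Nat) (d : α) (h : i < l.length) :
    (l ++ l').getD i d = l.getD i d := by
  simp [List.getD, List.getElem?_append_left h]

lemma pv_getD_append_last {α : Type} (l : List α) (x : α) (d : α) :
    (l ++ [x]).getD l.length d = x := by
  simp [List.getD]

-- the naive characterisation both ports are reduced to ------------------------

def npred (t p : List String) (used : List (Int × Int)) (i s : Nat) : Bool :=
  decide (i < s + p.length) && decide ((t.drop s).take p.length = p) &&
    !(decide (((s : Int), (s : Int) + (p.length : Int)) ∈ used))

def naiveFrom (t p : List String) (used : List (Int × Int)) (i : Nat) : Option (Int × Int) :=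
  ((List.range' 0 (t.length - p.length + 1)).find? (npred t p used i)).map
    (fun s => ((s : Int), (s : Int) + (p.length : Int)))

-- KMP invariants -------------------------------------------------------------

-- q is a (≤ K)-bounded prefix length of p whose prefix is a suffix of w
def kmpBrd (p : List String) (K : Nat) (w : List String) (q : Nat) : Prop :=
  q ≤ K ∧ p.take q <:+ w
-- k is the largest such q
def kmpMax (p : List String) (K : Nat) (w : List String) (k : Nat) : Prop :=
  kmpBrd p K w k ∧ ∀ q, kmpBrd p K w q → q ≤ k
-- invariant of the while-descend: k is in the set, and every c-extendable member is ≤ k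
def kmpGood (p : List String) (K : Nat) (w : List String) (c : String) (k : Nat) : Prop :=
  k ≤ K ∧ p.take k <:+ w ∧ ∀ q, q ≤ K → p.take q <:+ w → p.getD q "" = c → q ≤ k

lemma kmpStepGo_spec (p : List String) (fail : List Nat) (c : String) (K : Nat) (w : List String)
    (hK : K < p.length)
    (HF : ∀ i, i < K → kmpMax p i (p.take (i+1)) (fail.getD i 0)) :
    ∀ (fuel k : Nat), k ≤ fuel → kmpGood p K w c k →
      kmpGood p K w c (kmpStepGo p fail c fuel k) ∧
        (kmpStepGo p fail c fuel k = 0 ∨ p.getD (kmpStepGo p fail c fuel k) "" = c) := by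
  intro fuel
  induction fuel with
  | zero =>
      intro k hk hG
      simp only [kmpStepGo]
      by_cases h0 : k = 0
      · exact ⟨hG, Or.inl h0⟩
      · exact absurd hk (by omega)
  | succ fuel ih =>
      intro k hk hG
      simp only [kmpStepGo]
      by_cases hcond : 0 < k ∧ ¬ p.getD k "" = c
      · rw [if_pos hcond]
        obtain ⟨hk0, hkc⟩ := hcond
        obtain ⟨hGK, hGs, hGmax⟩ := hG
        have hKmax := HF (k - 1) (by omega)
        rw [show k - 1 + 1 = k from by omega] at hKmax
        have hk'le : fail.getD (k-1) 0 ≤ k - 1 := hKmax.1.1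
        apply ih
        · omega
        · refine ⟨by omega, hKmax.1.2.trans hGs, ?_⟩
          intro q hq hqs hqc
          have hq_le : q ≤ k := hGmax q hq hqs hqc
          have hq_ne : q ≠ k := fun h => hkc (h ▸ hqc)
          have hsub : p.take q <:+ p.take k :=
            suffix_of_suffix_le _ _ _ hqs hGs (by rw [List.length_take, List.length_take]; omega)
          exact hKmax.2 q ⟨by omega, hsub⟩
      · rw [if_neg hcond]
        refine ⟨hG, ?_⟩
        by_cases h0 : k = 0
        · exact Or.inl h0
        · right
          by_contra hc
          exact hcond ⟨Nat.pos_of_ne_zero h0, hc⟩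

lemma kmpStep_max (p : List String) (fail : List Nat) (K k : Nat) (c : String) (w : List String)
    (hK : K < p.length)
    (HF : ∀ i, i < K → kmpMax p i (p.take (i+1)) (fail.getD i 0))
    (hk : kmpMax p K w k) :
    kmpMax p (K+1) (w ++ [c]) (kmpStep p fail k c) := by
  have hG : kmpGood p K w c k := ⟨hk.1.1, hk.1.2, fun q hq hqs _ => hk.2 q ⟨hq, hqs⟩⟩
  obtain ⟨hG', hexit⟩ := kmpStepGo_spec p fail c K w hK HF k k le_rfl hG
  obtain ⟨hrK, hrs, hrmax⟩ := hG'
  unfold kmpStep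
  by_cases hc : p.getD (kmpStepGo p fail c k k) "" = c
  · rw [if_pos hc]
    refine ⟨⟨by omega, ?_⟩, ?_⟩
    · exact (ext_suffix_iff p w c _ (by omega)).mpr ⟨hrs, hc⟩
    · intro q hq
      obtain ⟨hq1, hq2⟩ := hq
      cases q with
      | zero => exact Nat.zero_le _
      | succ q =>
          have hqm : q < p.length := by omega
          have h2 := (ext_suffix_iff p w c q hqm).mp hq2
          have h3 := hrmax q (by omega) h2.1 h2.2
          omega
  · rw [if_neg hc]
    have hr0 : kmpStepGo p fail c k k = 0 := by
      rcases hexit with h | h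
      · exact h
      · exact absurd h hc
    refine ⟨⟨Nat.zero_le _, by simp⟩, ?_⟩
    intro q hq
    obtain ⟨hq1, hq2⟩ := hq
    cases q with
    | zero => exact le_rfl
    | succ q =>
        have hqm : q < p.length := by omega
        have h2 := (ext_suffix_iff p w c q hqm).mp hq2
        have h3 := hrmax q (by omega) h2.1 h2.2
        have hq0 : q = 0 := by rw [hr0] at h3; omega
        exfalso
        apply hc
        rw [hr0, ← hq0]
        exact h2.2

lemma kmpBuild_spec (p : List String) :
    ∀ (cnt : Nat) (fail : List Nat) (k : Nat),
      fail.length + cnt = p.length → 0 < fail.length →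
      (∀ i, i < fail.length → kmpMax p i (p.take (i+1)) (fail.getD i 0)) →
      k = fail.getD (fail.length - 1) 0 →
      ((kmpBuild p cnt fail k).length = p.length ∧
        ∀ i, i < p.length → kmpMax p i (p.take (i+1)) ((kmpBuild p cnt fail k).getD i 0)) := by
  intro cnt
  induction cnt with
  | zero =>
      intro fail k hlen hpos HF _
      simp only [kmpBuild]
      exact ⟨by omega, fun i hi => HF i (by omega)⟩
  | succ cnt ih =>
      intro fail k hlen hpos HF hk
      simp only [kmpBuild]
      have hjm : fail.length < p.length := by omega
      have hstep : kmpMax p fail.length (p.take (fail.length + 1))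
          (kmpStep p fail k (p.getD fail.length "")) := by
        have h1 : kmpMax p (fail.length - 1) (p.take fail.length) k := by
          rw [hk]
          have h := HF (fail.length - 1) (by omega)
          rw [show fail.length - 1 + 1 = fail.length from by omega] at h
          exact h
        have h2 := kmpStep_max p fail (fail.length - 1) k (p.getD fail.length "")
          (p.take fail.length) (by omega) (fun i hi => HF i (by omega)) h1
        rw [show fail.length - 1 + 1 = fail.length from by omega] at h2
        rwa [← take_succ_getD p fail.length hjm] at h2
      refine ih _ _ ?_ ?_ ?_ ?_
      · simp; omega
      · simp
      · intro i hi
        simp only [List.length_append, List.length_cons, List.length_nil] at hi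
        by_cases hlt : i < fail.length
        · rw [pv_getD_append_left _ _ _ _ hlt]
          exact HF i hlt
        · have hieq : i = fail.length := by omega
          subst hieq
          rw [pv_getD_append_last]
          exact hstep
      · have hlen1 : (fail ++ [kmpStep p fail k (p.getD fail.length "")]).length - 1 = fail.length := by
          simp
        rw [hlen1, pv_getD_append_last]

lemma kmpScan_eq (p t : List String) (fail : List Nat) (used : List (Int × Int))
    (hm : 0 < p.length) (hmn : p.length ≤ t.length)
    (HF : ∀ i, i < p.length → kmpMax p i (p.take (i+1)) (fail.getD i 0)) :
    ∀ (ts : List String) (i j : Nat), ts = t.drop i → i ≤ t.length →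
      kmpMax p (p.length - 1) (t.take i) j →
      kmpScan p fail used ts i j = naiveFrom t p used i := by
  intro ts
  induction ts with
  | nil =>
      intro i j hdrop hi _
      have hlen : t.length ≤ i := by
        have h := congrArg List.length hdrop
        simp at h
        omega
      simp only [kmpScan]
      unfold naiveFrom
      have hnone : (List.range' 0 (t.length - p.length + 1)).find? (npred t p used i) = none :=
        List.find?_eq_none.mpr (by
          intro s hs hT
          have hsb := (List.mem_range'_1.mp hs).2
          simp only [npred, Bool.and_eq_true, decide_eq_true_eq] at hT
          obtain ⟨⟨hT1, _⟩, _⟩ := hT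
          omega)
      rw [hnone]
      rfl
  | cons c ts ih =>
      intro i j hdrop hi hinv
      have hilt : i < t.length := by
        by_contra h
        rw [List.drop_eq_nil_of_le (not_lt.mp h)] at hdrop
        simp at hdrop
      have hget := List.drop_eq_getElem_cons hilt
      rw [hget] at hdrop
      injection hdrop with hc hts
      subst hc
      have htake : t.take (i+1) = t.take i ++ [t[i]] := by
        rw [List.take_add_one, List.getElem?_eq_getElem hilt]
        rfl
      have hstep0 := kmpStep_max p fail (p.length - 1) j (t[i]) (t.take i) (by omega)
        (fun i2 hi2 => HF i2 (by omega)) hinv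
      rw [show p.length - 1 + 1 = p.length from by omega, ← htake] at hstep0
      simp only [kmpScan]
      by_cases hfull : kmpStep p fail j t[i] = p.length
      · rw [if_pos hfull]
        have hsfx : p <:+ t.take (i+1) := by
          have h1 := hstep0.1.2
          rw [hfull, List.take_length] at h1
          exact h1
        have hm1 : p.length ≤ i + 1 := by
          have h2 := hsfx.length_le
          rw [List.length_take] at h2
          omega
        set s₀ := i + 1 - p.length with hs₀def
        have hspan : ((i : Int) + 1 - (p.length : Int), (i : Int) + 1) =
            ((s₀ : Int), (s₀ : Int) + (p.length : Int)) := by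
          rw [Prod.mk.injEq]
          constructor <;> omega
        rw [hspan]
        have hwin : (t.drop s₀).take p.length = p := by
          apply (window_iff_suffix t p s₀ (by omega)).mpr
          rw [show s₀ + p.length = i + 1 from by omega]
          exact hsfx
        by_cases hmem : ((s₀ : Int), (s₀ : Int) + (p.length : Int)) ∈ used
        · rw [if_neg (by simpa using hmem)]
          have hfm := HF (p.length - 1) (by omega)
          rw [show p.length - 1 + 1 = p.length from by omega, List.take_length] at hfm
          have hinv' : kmpMax p (p.length - 1) (t.take (i+1)) (fail.getD (p.length - 1) 0) := by
            refine ⟨⟨hfm.1.1, hfm.1.2.trans hsfx⟩, ?_⟩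
            intro q hq
            obtain ⟨hq1, hq2⟩ := hq
            refine hfm.2 q ⟨hq1, suffix_of_suffix_le _ _ _ hq2 hsfx ?_⟩
            rw [List.length_take]
            omega
          rw [ih (i+1) _ hts (by omega) hinv']
          unfold naiveFrom
          rw [pv_find?_congr _ (npred t p used (i+1)) (npred t p used i) ?_]
          intro s hs
          by_cases h1 : s + p.length ≤ i
          · simp [npred, show ¬ (i < s + p.length) from by omega,
              show ¬ (i + 1 < s + p.length) from by omega]
          · by_cases h2 : s + p.length = i + 1
            · have hss : s = s₀ := by omega
              subst hss
              simp [npred, hmem, show ¬ (i + 1 < s₀ + p.length) from by omega]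
            · simp [npred, show i < s + p.length from by omega,
                show i + 1 < s + p.length from by omega]
        · rw [if_pos (by simpa using hmem)]
          unfold naiveFrom
          rw [pv_find?_range'_some (npred t p used i) s₀ (t.length - p.length + 1) 0
            (Nat.zero_le _) (by omega) ?_ ?_]
          · rfl
          · simp [npred, hwin, hmem, show i < s₀ + p.length from by omega]
          · intro s hsge hslt
            simp [npred, show ¬ (i < s + p.length) from by omega]
      · rw [if_neg hfull]
        have hinv' : kmpMax p (p.length - 1) (t.take (i+1)) (kmpStep p fail j t[i]) := by
          refine ⟨⟨?_, hstep0.1.2⟩, ?_⟩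
          · have h1 := hstep0.1.1
            omega
          · intro q hq
            obtain ⟨hq1, hq2⟩ := hq
            exact hstep0.2 q ⟨hq1.trans (Nat.sub_le _ _), hq2⟩
        rw [ih (i+1) _ hts (by omega) hinv']
        have hnowin : ∀ s, s + p.length = i + 1 → ¬ ((t.drop s).take p.length = p) := by
          intro s hsum hwin
          have hsfx : p <:+ t.take (i+1) := by
            rw [← hsum]
            exact (window_iff_suffix t p s (by omega)).mp hwin
          have hle : p.length ≤ kmpStep p fail j t[i] := by
            apply hstep0.2
            exact ⟨le_rfl, by rw [List.take_length]; exact hsfx⟩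
          have hub := hstep0.1.1
          exact hfull (le_antisymm hub hle)
        unfold naiveFrom
        rw [pv_find?_congr _ (npred t p used (i+1)) (npred t p used i) ?_]
        intro s hs
        by_cases h1 : s + p.length ≤ i
        · simp [npred, show ¬ (i < s + p.length) from by omega,
            show ¬ (i + 1 < s + p.length) from by omega]
        · by_cases h2 : s + p.length = i + 1
          · simp [npred, hnowin s h2, show ¬ (i + 1 < s + p.length) from by omega]
          · simp [npred, show i < s + p.length from by omega,
              show i + 1 < s + p.length from by omega]

-- A's loop, reduced to the same characterisation ------------------------------

lemma fssA_go_cons (tokens entity_tokens : List String) (used_spans : List (Int × Int))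
    (start : Int) (more : List Int) :
    fssA_go tokens entity_tokens used_spans (start :: more) =
      if PySem.List.slice tokens (some start) (some (start + entity_tokens.length)) = entity_tokens ∧
         (start, start + (entity_tokens.length : Int)) ∉ used_spans
      then some (start, start + entity_tokens.length)
      else fssA_go tokens entity_tokens used_spans more := rfl

lemma fssA_eq (t p : List String) (used : List (Int × Int)) (hm : 0 < p.length)
    (hmn : p.length ≤ t.length) :
    ∀ (k a : Nat), (t.length - p.length + 1) - a = k →
      fssA_go t p used (PySem.List.pyRange (a : Int) (((t.length - p.length + 1 : Nat)) : Int) 1) =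
        ((List.range' a ((t.length - p.length + 1) - a)).find? (npred t p used 0)).map
          (fun s => ((s : Int), (s : Int) + (p.length : Int))) := by
  intro k
  induction k with
  | zero =>
      intro a ha
      have hge : (t.length - p.length + 1) ≤ a := by omega
      rw [PySem.List.pyRange_one_eq_nil (by exact_mod_cast hge)]
      rw [show (t.length - p.length + 1) - a = 0 from by omega]
      rfl
  | succ k ih =>
      intro a ha
      have hlt : a < t.length - p.length + 1 := by omega
      rw [PySem.List.pyRange_one_cons (by exact_mod_cast hlt)]
      rw [show (t.length - p.length + 1) - a = ((t.length - p.length + 1) - (a+1)) + 1 from by omega]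
      rw [List.range'_succ]
      rw [fssA_go_cons]
      rw [PySem.List.slice_natCast_add]
      by_cases hwin : (t.drop a).take p.length = p
      · by_cases hu : ((a : Int), (a : Int) + (p.length : Int)) ∈ used
        · rw [if_neg (fun h => h.2 hu)]
          rw [List.find?_cons_of_neg (by simp [npred, hu])]
          rw [show ((a : Int) + 1) = (((a + 1 : Nat)) : Int) from by push_cast; ring]
          exact ih (a+1) (by omega)
        · rw [if_pos ⟨hwin, hu⟩]
          rw [List.find?_cons_of_pos (by simp [npred, hwin, hu]; omega)]
          rfl
      · rw [if_neg (fun h => hwin h.1)]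
        rw [List.find?_cons_of_neg (by simp [npred, hwin])]
        rw [show ((a : Int) + 1) = (((a + 1 : Nat)) : Int) from by push_cast; ring]
        exact ih (a+1) (by omega)

-- ===== VERDICT (by name: the statement is the Claim_ definition above) =====
theorem find_sublist_span_spec : Claim_equal_find_sublist_span := by
  intro t p used _
  unfold Spec_find_sublist_span
  by_cases h0 : p.length = 0 ∨ t.length < p.length
  · have hA : find_sublist_span t p used = none := by
      unfold find_sublist_span
      rw [if_pos ?_]
      rcases h0 with h | h
      · exact Or.inl (List.eq_nil_of_length_eq_zero h)
      · exact Or.inr h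
    have hB : find_sublist_span_alt t p used = none := by
      unfold find_sublist_span_alt
      rw [if_pos ?_]
      rcases h0 with h | h
      · exact Or.inl h
      · exact Or.inr h
    rw [hA, hB]
  · rw [not_or] at h0
    obtain ⟨hm0, hlt⟩ := h0
    have hmn : p.length ≤ t.length := not_lt.mp hlt
    have hm : 0 < p.length := Nat.pos_of_ne_zero hm0
    have hAeq : find_sublist_span t p used = naiveFrom t p used 0 := by
      unfold find_sublist_span
      have hcondA : ¬ (p = [] ∨ p.length > t.length) := by
        rintro (h | h)
        · exact hm0 (by simp [h])
        · omega
      rw [if_neg hcondA]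
      have h := fssA_eq t p used hm hmn (t.length - p.length + 1) 0 (by omega)
      simp only [Nat.cast_zero] at h
      rw [show (t.length : Int) - (p.length : Int) + 1 = (((t.length - p.length + 1 : Nat)) : Int) from by omega]
      rw [h]
      simp [naiveFrom]
    have hinit : ∀ i, i < ([0] : List Nat).length →
        kmpMax p i (p.take (i+1)) (([0] : List Nat).getD i 0) := by
      intro i hi
      simp at hi
      subst hi
      rw [show ([0] : List Nat).getD 0 0 = 0 from rfl]
      exact ⟨⟨le_rfl, by simp⟩, fun q hq => hq.1⟩
    have hbuild := kmpBuild_spec p (p.length - 1) [0] 0 (by simp; omega) (by simp) hinit rfl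
    have hinv0 : kmpMax p (p.length - 1) (t.take 0) 0 := by
      refine ⟨⟨Nat.zero_le _, by simp⟩, ?_⟩
      intro q hq
      obtain ⟨hq1, hq2⟩ := hq
      rw [List.take_zero] at hq2
      have hq3 := List.suffix_nil.mp hq2
      have hq4 := congrArg List.length hq3
      rw [List.length_take] at hq4
      simp only [List.length_nil] at hq4
      omega
    have hBeq : find_sublist_span_alt t p used = naiveFrom t p used 0 := by
      unfold find_sublist_span_alt
      rw [if_neg (by omega)]
      exact kmpScan_eq p t _ used hm hmn hbuild.2 t 0 0 (by simp) (Nat.zero_le _) hinv0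
    rw [hAeq, hBeq]
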